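-- pv_equiv track=rewrite | github.com/Sudhanshu7321/DSA | 0 practice/Atlassian/maximum number of occurance of substring .py | solution
-- ===== SOURCE A (Python) =====
-- def solution(s,maxLetters,minSize,maxSize):
--
--     fre = {}
--     for i in range(len(s)-minSize+1):
--         subString = s[i:i+minSize]
--         if len(set(subString)) <= maxLetters:
--             fre[subString] = fre.get(subString,0)+1
--
--     # fre = dict(sorted(fre.items() ,key= lambda x:x[1],reverse=True))
--
--     for d in fre:
--         return fre[d]
-- ===== SOURCE B (Python) =====
-- def solution(s, maxLetters, minSize, maxSize):
--     # find the leftmost valid window, then count its overlapping occurrences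
--     n = len(s) - minSize + 1
--     sub = None
--     for i in range(n):
--         w = s[i:i+minSize]
--         if len(set(w)) <= maxLetters:
--             sub = w
--             break
--     if sub is None:
--         return None
--     return sum(1 for j in range(n) if s[j:j+minSize] == sub)
-- ===== Notes on version B (the rewrite author's own statement) =====
-- stated objective: faster
-- what changed: B drops A's full substring-frequency dictionary: it early-exits at the leftmost window whose distinct-letter count is within maxLetters, then counts overlapping occurrences of that one substring in a single second pass (None when no window qualifies).
import Mathlib
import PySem

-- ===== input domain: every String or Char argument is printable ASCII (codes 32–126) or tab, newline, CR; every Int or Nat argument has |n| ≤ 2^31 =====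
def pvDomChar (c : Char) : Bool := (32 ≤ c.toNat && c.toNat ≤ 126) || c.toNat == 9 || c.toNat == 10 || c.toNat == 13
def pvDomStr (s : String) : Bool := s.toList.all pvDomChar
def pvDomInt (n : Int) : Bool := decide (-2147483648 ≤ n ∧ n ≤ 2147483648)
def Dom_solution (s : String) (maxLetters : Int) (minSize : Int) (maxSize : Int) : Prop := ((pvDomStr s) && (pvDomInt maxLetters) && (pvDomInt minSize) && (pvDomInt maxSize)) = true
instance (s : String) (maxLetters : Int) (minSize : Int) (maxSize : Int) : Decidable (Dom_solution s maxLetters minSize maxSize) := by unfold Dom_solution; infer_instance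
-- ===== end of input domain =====

-- B replaces A's full substring-frequency dict with an early-exit search for the leftmost
-- valid window followed by a single overlapping-occurrence count (objective: simpler).

-- ===== PORT A =====
def solution (s : String) (maxLetters : Int) (minSize : Int) (maxSize : Int) : Option Int :=
  let cs := s.toList
  let fre : PySem.Dict (List Char) Int :=
    (PySem.List.pyRange 0 ((cs.length : Int) - minSize + 1) 1).foldl
      (fun fre i =>
        let subString := PySem.List.slice cs (some i) (some (i + minSize))
        if ((PySem.Set.ofList subString).length : Int) ≤ maxLetters then
          fre.insert subString (fre.getD subString 0 + 1)
        else fre)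
      PySem.Dict.empty
  -- 'for d in fre: return fre[d]': returns fre[d] for the first key d (present, so get? is some);
  -- falls through to an implicit 'return None' when the dict is empty
  match fre.keys with
  | [] => none
  | d :: _ => fre.get? d

-- ===== PORT B =====
def solution_alt (s : String) (maxLetters : Int) (minSize : Int) (maxSize : Int) : Option Int :=
  let cs := s.toList
  let n : Int := (cs.length : Int) - minSize + 1
  match (PySem.List.pyRange 0 n 1).find?
      (fun i => decide (((PySem.Set.ofList (PySem.List.slice cs (some i) (some (i + minSize)))).length : Int) ≤ maxLetters)) with
  | none => none
  | some i =>
    let sub := PySem.List.slice cs (some i) (some (i + minSize))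
    some (((PySem.List.pyRange 0 n 1).countP
      (fun j => PySem.List.slice cs (some j) (some (j + minSize)) == sub)) : Int)

-- ===== PRECONDITION & SPEC =====
def Spec_solution (s : String) (maxLetters : Int) (minSize : Int) (maxSize : Int) (out : Option Int) : Prop := out = solution_alt s maxLetters minSize maxSize
instance (s : String) (maxLetters : Int) (minSize : Int) (maxSize : Int) (out : Option Int) : Decidable (Spec_solution s maxLetters minSize maxSize out) := by unfold Spec_solution; infer_instance

-- ===== CLAIM (what is proved, stated in full; the proofs are below) =====
def Claim_equal_solution : Prop := ∀ (s : String) (maxLetters : Int) (minSize : Int) (maxSize : Int), Dom_solution s maxLetters minSize maxSize → Spec_solution s maxLetters minSize maxSize (solution s maxLetters minSize maxSize)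

-- ===== LEMMAS AND PROOFS =====

-- A's guarded counting loop is the plain counter fold over the valid windows' substrings.
lemma pvFoldlIteFilterMap {α β δ : Type} (p : α → Prop) [DecidablePred p] (f : α → β) (g : δ → β → δ) :
    ∀ (l : List α) (d : δ),
      l.foldl (fun d i => if p i then g d (f i) else d) d
        = ((l.filter (fun i => decide (p i))).map f).foldl g d
  | [], _ => rfl
  | x :: l, d => by
    by_cases hx : p x <;>
      simp [hx, pvFoldlIteFilterMap p f g l]

-- folding Set.add only appends, so a nonempty accumulator keeps its head
lemma pvHeadFoldlAdd {α : Type} [BEq α] :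
    ∀ (l t : List α) (a : α), (l.foldl PySem.Set.add (a :: t)).head? = some a
  | [], _, _ => rfl
  | x :: l, t, a => by
    have h : ∃ t', PySem.Set.add (a :: t) x = a :: t' := by
      unfold PySem.Set.add
      split_ifs
      · exact ⟨t, rfl⟩
      · exact ⟨t ++ [x], rfl⟩
    obtain ⟨t', ht'⟩ := h
    simp only [List.foldl_cons, ht']
    exact pvHeadFoldlAdd l t' a

-- the first element of set(xs)-as-ordered-dedup is the first element of xs
lemma pvHeadOfList {α : Type} [BEq α] (xs : List α) :
    (PySem.Set.ofList xs).head? = xs.head? := by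
  cases xs with
  | nil => rfl
  | cons x l =>
    rw [PySem.Set.ofList_eq_foldl]
    simp only [List.foldl_cons]
    have hadd : PySem.Set.add ([] : List α) x = [x] := rfl
    rw [hadd]
    exact pvHeadFoldlAdd l [] x

-- core equivalence, no-valid-window case: the frequency dict stays empty
lemma pvKeysNone {κ : Type} [BEq κ] [LawfulBEq κ] (R : List Int) (sub : Int → κ)
    (p : Int → Prop) [DecidablePred p]
    (h : R.find? (fun i => decide (p i)) = none) :
    (R.foldl (fun fre i => if p i then fre.insert (sub i) (fre.getD (sub i) 0 + 1) else fre)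
        (PySem.Dict.empty : PySem.Dict κ Int)).keys = [] := by
  have hfold := pvFoldlIteFilterMap p sub
    (fun (d : PySem.Dict κ Int) x => d.insert x (d.getD x 0 + 1)) R PySem.Dict.empty
  rw [PySem.Dict.foldl_insert_getD_add_one_eq_counter] at hfold
  rw [hfold, PySem.Dict.keys_counter]
  have hnil : R.filter (fun i => decide (p i)) = [] :=
    List.head?_eq_none_iff.mp (by rw [List.head?_filter, h])
  rw [hnil]
  rfl

-- core equivalence, found case: the dict's first key is the leftmost valid window's substring
-- and its count is the number of equal windows; hp says validity depends only on the window's content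
lemma pvCoreSome {κ : Type} [BEq κ] [LawfulBEq κ] (R : List Int) (sub : Int → κ)
    (p : Int → Prop) [DecidablePred p]
    (hp : ∀ i j, sub j = sub i → (p j ↔ p i)) (i : Int)
    (h : R.find? (fun i => decide (p i)) = some i) :
    ∃ t, (R.foldl (fun fre i => if p i then fre.insert (sub i) (fre.getD (sub i) 0 + 1) else fre)
        (PySem.Dict.empty : PySem.Dict κ Int)).keys = sub i :: t ∧
      (R.foldl (fun fre i => if p i then fre.insert (sub i) (fre.getD (sub i) 0 + 1) else fre)
        (PySem.Dict.empty : PySem.Dict κ Int)).get? (sub i)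
        = some ((R.countP (fun j => sub j == sub i) : Nat) : Int) := by
  have hfold := pvFoldlIteFilterMap p sub
    (fun (d : PySem.Dict κ Int) x => d.insert x (d.getD x 0 + 1)) R PySem.Dict.empty
  rw [PySem.Dict.foldl_insert_getD_add_one_eq_counter] at hfold
  rw [hfold, PySem.Dict.keys_counter]
  set W := (R.filter (fun i => decide (p i))).map sub with hW
  have hfhead : (R.filter (fun i => decide (p i))).head? = some i := by
    rw [List.head?_filter, h]
  obtain ⟨F', hF⟩ := List.head?_eq_some_iff.mp hfhead
  have hiMem : i ∈ R.filter (fun i => decide (p i)) := by rw [hF]; exact List.mem_cons_self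
  have hvi : p i := of_decide_eq_true (List.mem_filter.mp hiMem).2
  have hWcons : W = sub i :: F'.map sub := by rw [hW, hF]; rfl
  have hhead : (PySem.Set.ofList W).head? = some (sub i) := by
    rw [pvHeadOfList, hWcons]; rfl
  obtain ⟨t, ht⟩ := List.head?_eq_some_iff.mp hhead
  refine ⟨t, ht, ?_⟩
  have hget : (PySem.Dict.counter W).get? (sub i) = some ((W.count (sub i) : Nat) : Int) := by
    apply PySem.Dict.get?_of_mem_items
    · rw [PySem.Dict.items_counter]
      exact List.mem_map.mpr ⟨sub i, by rw [ht]; exact List.mem_cons_self, rfl⟩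
    · exact PySem.Dict.nodup_keys_counter W
  rw [hget]
  have hc : W.count (sub i) = R.countP (fun j => sub j == sub i) := by
    rw [hW, List.count_eq_countP, List.countP_map, List.countP_filter]
    apply List.countP_congr
    intro j _
    by_cases hj : sub j = sub i
    · simp only [Function.comp_apply, hj, beq_self_eq_true, Bool.true_and]
      exact iff_true_intro (decide_eq_true ((hp i j hj).mpr hvi))
    · simp [Function.comp_apply, hj]
  rw [hc]

-- ===== VERDICT (by name: the statement is the Claim_ definition above) =====
theorem solution_spec : Claim_equal_solution := by
  intro s mL mS mX _
  unfold Spec_solution solution solution_alt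
  dsimp only
  have hp : ∀ i j : Int,
      PySem.List.slice s.toList (some j) (some (j + mS))
        = PySem.List.slice s.toList (some i) (some (i + mS)) →
      ((((PySem.Set.ofList (PySem.List.slice s.toList (some j) (some (j + mS)))).length : Int) ≤ mL) ↔
        (((PySem.Set.ofList (PySem.List.slice s.toList (some i) (some (i + mS)))).length : Int) ≤ mL)) := by
    intro i j h
    rw [h]
  cases hf : (PySem.List.pyRange 0 ((s.toList.length : Int) - mS + 1) 1).find?
      (fun i => decide (((PySem.Set.ofList (PySem.List.slice s.toList (some i) (some (i + mS)))).length : Int) ≤ mL)) with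
  | none =>
    rw [pvKeysNone (PySem.List.pyRange 0 ((s.toList.length : Int) - mS + 1) 1)
      (fun i => PySem.List.slice s.toList (some i) (some (i + mS)))
      (fun i => ((PySem.Set.ofList (PySem.List.slice s.toList (some i) (some (i + mS)))).length : Int) ≤ mL) hf]
  | some i =>
    obtain ⟨t, hk, hg⟩ := pvCoreSome (PySem.List.pyRange 0 ((s.toList.length : Int) - mS + 1) 1)
      (fun i => PySem.List.slice s.toList (some i) (some (i + mS)))
      (fun i => ((PySem.Set.ofList (PySem.List.slice s.toList (some i) (some (i + mS)))).length : Int) ≤ mL)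
      hp i hf
    rw [hk]
    exact hg
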